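-- pv_equiv track=rewrite | github.com/matandasoftware/Capstone-Project-Consolidation-News-App | Level 1 - Python for Software Engineering/M02T09 – Debugging – The Stack Trace/debugging_the_stack_trace.py | count_red_green_blue
-- ===== SOURCE A (Python) =====
-- def count_red_green_blue(input_colors):
--     red_count = 0
--     green_count = 0
--     blue_count = 0
--     split_colors = input_colors.split(",")
--     for color in split_colors:
--         if color == "red":
--             red_count += 1
--         elif color == "green":
--             green_count += 1
--         elif color == "blue":
--             blue_count += 1
--     return f"Greens = {green_count}\nBlues = {blue_count}\nReds = {red_count}"
-- ===== SOURCE B (Python) =====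
-- def count_red_green_blue(input_colors):
--     counts = {"green": 0, "blue": 0, "red": 0}
--     s = input_colors
--     while True:
--         head, sep, s = s.partition(",")
--         if head in counts:
--             counts[head] += 1
--         if not sep:
--             break
--     return f"Greens = {counts['green']}\nBlues = {counts['blue']}\nReds = {counts['red']}"
-- ===== Notes on version B (the rewrite author's own statement) =====
-- stated objective: alternative
-- what changed: B never calls split and has no per-color if/elif chain: it consumes the string token by token with str.partition(",") in a while loop, tallying each token into a pre-seeded dict histogram, then reads the three counts out of the dict.
import Mathlib
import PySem

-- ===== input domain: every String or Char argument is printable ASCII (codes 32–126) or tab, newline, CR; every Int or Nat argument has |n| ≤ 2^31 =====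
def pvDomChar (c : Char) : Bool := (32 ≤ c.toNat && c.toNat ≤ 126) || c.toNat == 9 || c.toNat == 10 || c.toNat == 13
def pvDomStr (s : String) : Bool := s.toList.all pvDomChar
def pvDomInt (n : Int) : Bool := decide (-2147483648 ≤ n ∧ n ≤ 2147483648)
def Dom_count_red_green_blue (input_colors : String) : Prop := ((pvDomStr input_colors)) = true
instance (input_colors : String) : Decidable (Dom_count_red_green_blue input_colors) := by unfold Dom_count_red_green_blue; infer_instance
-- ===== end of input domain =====

-- B replaces A's split-then-loop with an if/elif chain by a partition-driven while loop tallying into a dict histogram (alternative decomposition; same cost).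

-- ===== PORT A =====
-- A: three counters, one loop over the split tokens with an if/elif chain, then the f-string.
def count_red_green_blue (input_colors : String) : String :=
  let split_colors := (PySem.Str.split? input_colors ",").getD []   -- sep "," ≠ "": split? is always some
  let acc := split_colors.foldl
    (fun (acc : Int × Int × Int) color =>
      if color = "red" then (acc.1 + 1, acc.2.1, acc.2.2)
      else if color = "green" then (acc.1, acc.2.1 + 1, acc.2.2)
      else if color = "blue" then (acc.1, acc.2.1, acc.2.2 + 1)
      else acc)
    (0, 0, 0)
  PySem.Str.join "" ["Greens = ", PySem.Int.toStr acc.2.1, "\nBlues = ", PySem.Int.toStr acc.2.2, "\nReds = ", PySem.Int.toStr acc.1]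

-- ===== PORT B =====
-- B-side helper: s.partition(",") restricted to what B uses — the head before the
-- first comma, plus (some rest) if a comma was found / none if not (sep truthiness).
-- Exact for the single-character separator ",".
def partComma : List Char → List Char × Option (List Char)
  | [] => ([], none)
  | c :: rest =>
    if c = ',' then ([], some rest)
    else
      let p := partComma rest
      (c :: p.1, p.2)

lemma partComma_some_length : ∀ (cs h r : List Char), partComma cs = (h, some r) → r.length < cs.length := by
  intro cs
  induction cs with
  | nil => intro h r e; simp [partComma] at e
  | cons c rest ih =>
    intro h r e
    by_cases hc : c = ','
    · simp [partComma, hc] at e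
      simp [e.2.symm]
    · have e2 : (partComma rest).2 = some r := by
        simpa [partComma, hc] using congrArg Prod.snd e
      have := ih (partComma rest).1 r (by rw [← e2])
      simpa using Nat.lt_succ_of_lt this

-- B-side helper: the body of B's while loop — bump the dict at head if present.
def rgbBump (d : PySem.Dict String Int) (head : List Char) : PySem.Dict String Int :=
  let k := String.ofList head
  if d.contains k then d.modify k 0 (· + 1) else d

-- B-side: the while loop (head, sep, s = s.partition(","); tally; stop when no sep).
def tallyLoop (cs : List Char) (d : PySem.Dict String Int) : PySem.Dict String Int :=
  match hp : partComma cs with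
  | (head, none) => rgbBump d head
  | (head, some rest) => tallyLoop rest (rgbBump d head)
termination_by cs.length
decreasing_by exact partComma_some_length cs head rest hp

-- B: pre-seeded dict histogram, partition loop, three dict reads into the f-string.
def count_red_green_blue_alt (input_colors : String) : String :=
  let counts0 : PySem.Dict String Int :=
    ((PySem.Dict.empty.insert "green" 0).insert "blue" 0).insert "red" 0
  let counts := tallyLoop input_colors.toList counts0
  PySem.Str.join "" ["Greens = ", PySem.Int.toStr (counts.getD "green" 0),
                     "\nBlues = ", PySem.Int.toStr (counts.getD "blue" 0),
                     "\nReds = ", PySem.Int.toStr (counts.getD "red" 0)]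

-- ===== PRECONDITION & SPEC =====
def Spec_count_red_green_blue (input_colors : String) (out : String) : Prop := out = count_red_green_blue_alt input_colors
instance (input_colors : String) (out : String) : Decidable (Spec_count_red_green_blue input_colors out) := by unfold Spec_count_red_green_blue; infer_instance

-- ===== CLAIM (what is proved, stated in full; the proofs are below) =====
def Claim_equal_count_red_green_blue : Prop := ∀ (input_colors : String), Dom_count_red_green_blue input_colors → Spec_count_red_green_blue input_colors (count_red_green_blue input_colors)

-- ===== LEMMAS AND PROOFS =====

-- proof helper: prepend chars onto the first token of a token list
def prep (p : List Char) : List (List Char) → List (List Char)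
  | [] => [p]
  | t :: ts => (p ++ t) :: ts

-- proof helper: the comma-token list, by forward structural recursion
def toksC : List Char → List (List Char)
  | [] => [[]]
  | c :: r => if c = ',' then [] :: toksC r else prep [c] (toksC r)

lemma toksC_ne_nil (l : List Char) : toksC l ≠ [] := by
  cases l with
  | nil => simp [toksC]
  | cons c r =>
    simp only [toksC]
    split
    · simp
    · cases h : toksC r <;> simp [prep]

lemma prep_nil_of_ne (ts : List (List Char)) (h : ts ≠ []) : prep [] ts = ts := by
  cases ts with
  | nil => exact absurd rfl h
  | cons t ts => simp [prep]

lemma partComma_none_toksC : ∀ (cs h : List Char), partComma cs = (h, none) → toksC cs = [h] := by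
  intro cs
  induction cs with
  | nil => intro h e; simp [partComma] at e; simp [toksC, e]
  | cons c rest ih =>
    intro h e
    by_cases hc : c = ','
    · simp [partComma, hc] at e
    · simp [partComma, hc] at e
      rcases e with ⟨e1, e2⟩
      rcases hp : partComma rest with ⟨h', t'⟩
      rw [hp] at e1 e2
      cases t' with
      | some r' => simp at e2
      | none =>
        have := ih h' (by rw [hp])
        simp [toksC, hc, this, prep, ← e1]

lemma partComma_some_toksC : ∀ (cs h r : List Char), partComma cs = (h, some r) → toksC cs = h :: toksC r := by
  intro cs
  induction cs with
  | nil => intro h r e; simp [partComma] at e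
  | cons c rest ih =>
    intro h r e
    by_cases hc : c = ','
    · simp [partComma, hc] at e
      simp [toksC, hc, e.1.symm, e.2]
    · simp [partComma, hc] at e
      rcases e with ⟨e1, e2⟩
      rcases hp : partComma rest with ⟨h', t'⟩
      rw [hp] at e1 e2
      cases t' with
      | none => simp at e2
      | some r' =>
        simp at e2
        have := ih h' r' (by rw [hp, e2])
        simp [toksC, hc, this, prep, ← e1, e2]

-- B's loop is a fold of rgbBump over the comma tokens.
lemma tallyLoop_eq_foldl : ∀ (n : ℕ) (cs : List Char) (d : PySem.Dict String Int), cs.length ≤ n →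
    tallyLoop cs d = (toksC cs).foldl rgbBump d := by
  intro n
  induction n with
  | zero =>
    intro cs d hn
    have : cs = [] := by cases cs <;> simp_all
    subst this
    rw [tallyLoop]
    simp [toksC, partComma, prep]
  | succ n ih =>
    intro cs d hn
    rw [tallyLoop]
    rcases hp : partComma cs with ⟨h, t⟩
    cases t with
    | none => simp [partComma_none_toksC cs h hp]
    | some r =>
      have hr : r.length ≤ n := by
        have := partComma_some_length cs h r hp
        omega
      simp [partComma_some_toksC cs h r hp, ih r _ hr]

-- membership of a key is preserved and its count accumulates through the fold
lemma contains_rgbBump (d : PySem.Dict String Int) (t : List Char) (k : String) (h : d.contains k = true) :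
    (rgbBump d t).contains k = true := by
  by_cases hct : d.contains (String.ofList t) = true
  · simp [rgbBump, hct, PySem.Dict.contains_modify, h]
  · simp [rgbBump, hct, h]

lemma getD_foldl_rgbBump : ∀ (l : List (List Char)) (d : PySem.Dict String Int) (k : String), d.contains k = true →
    (l.foldl rgbBump d).getD k 0 = d.getD k 0 + ((l.map String.ofList).count k : Int) := by
  intro l
  induction l with
  | nil => intro d k _; simp
  | cons t ts ih =>
    intro d k hk
    have hk' : (rgbBump d t).contains k = true := contains_rgbBump d t k hk
    rw [List.foldl_cons, ih _ k hk']
    by_cases he : String.ofList t = k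
    · simp [rgbBump, he, hk, PySem.Dict.getD_modify, List.count_cons]
      ring
    · by_cases hct : d.contains (String.ofList t) = true
      · simp [rgbBump, hct, PySem.Dict.getD_modify, List.count_cons, he, Ne.symm he]
      · simp [rgbBump, hct, List.count_cons]
        exact he

-- the fuel-driven splitOn.go at separator "," computes toksC
lemma splitOn_go_comma : ∀ (fuel : ℕ) (l cur : List Char) (acc : List (List Char)), l.length ≤ fuel →
    PySem.Chars.splitOn.go [','] fuel l cur acc = acc.reverse ++ prep cur.reverse (toksC l) := by
  intro fuel
  induction fuel with
  | zero =>
    intro l cur acc hl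
    have : l = [] := by cases l <;> simp_all
    subst this
    simp [PySem.Chars.splitOn.go, toksC, prep]
  | succ n ih =>
    intro l cur acc hl
    cases l with
    | nil => simp [PySem.Chars.splitOn.go, toksC, prep]
    | cons c rest =>
      by_cases hc : c = ','
      · subst hc
        have hpre : [','].isPrefixOf (',' :: rest) = true := by simp [List.isPrefixOf]
        rw [PySem.Chars.splitOn.go]
        simp only [hpre, if_true, List.length_singleton, List.drop_one, List.tail_cons]
        rw [ih rest [] (cur.reverse :: acc) (by simpa using Nat.le_of_succ_le_succ hl)]
        simp only [List.reverse_nil]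
        rw [prep_nil_of_ne _ (toksC_ne_nil rest)]
        simp [toksC, prep]
      · have hpre : [','].isPrefixOf (c :: rest) = false := by simp [List.isPrefixOf, Ne.symm hc]
        rw [PySem.Chars.splitOn.go]
        simp only [hpre, Bool.false_eq_true, if_false]
        rw [ih rest (c :: cur) acc (by simpa using Nat.le_of_succ_le_succ hl)]
        rcases ht : toksC rest with _ | ⟨t, ts⟩
        · exact absurd ht (toksC_ne_nil rest)
        · simp [toksC, hc, ht, prep]

lemma tallyLoop_eq_foldl' (cs : List Char) (d : PySem.Dict String Int) :
    tallyLoop cs d = (toksC cs).foldl rgbBump d :=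
  tallyLoop_eq_foldl cs.length cs d le_rfl

lemma splitOn_comma (cs : List Char) : PySem.Chars.splitOn cs [','] = toksC cs := by
  unfold PySem.Chars.splitOn
  rw [splitOn_go_comma (cs.length + 1) cs [] [] (by omega)]
  simp [prep_nil_of_ne _ (toksC_ne_nil cs)]

-- A's counting loop computes the three token counts (from the previous development).
lemma rgb_loop_eq (tokens : List String) (r g b : Int) :
    tokens.foldl
      (fun (acc : Int × Int × Int) color =>
        if color = "red" then (acc.1 + 1, acc.2.1, acc.2.2)
        else if color = "green" then (acc.1, acc.2.1 + 1, acc.2.2)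
        else if color = "blue" then (acc.1, acc.2.1, acc.2.2 + 1)
        else acc)
      (r, g, b)
    = (r + (PySem.List.count tokens "red" : Int),
       g + (PySem.List.count tokens "green" : Int),
       b + (PySem.List.count tokens "blue" : Int)) := by
  induction tokens generalizing r g b with
  | nil => simp [PySem.List.count]
  | cons c cs ih =>
    simp only [List.foldl_cons, PySem.List.count_eq, List.count_cons] at *
    by_cases h1 : c = "red"
    · subst h1; simp [ih]; omega
    · by_cases h2 : c = "green"
      · subst h2; simp [ih, h1]; omega
      · by_cases h3 : c = "blue"
        · subst h3; simp [ih, h1, h2]; omega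
        · simp [ih, h1, h2, h3]

-- ===== VERDICT (by name: the statement is the Claim_ definition above) =====
set_option maxHeartbeats 1000000 in
theorem count_red_green_blue_spec : Claim_equal_count_red_green_blue := by
  intro s _
  unfold Spec_count_red_green_blue count_red_green_blue count_red_green_blue_alt
  have hsplit : (PySem.Str.split? s ",").getD [] = (toksC s.toList).map String.ofList := by
    simp [PySem.Str.split?, PySem.Chars.split?, splitOn_comma]
  have hd0 : ∀ k : String, k ∈ ["green", "blue", "red"] →
      (((PySem.Dict.empty.insert "green" (0:Int)).insert "blue" 0).insert "red" 0).contains k = true := by decide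
  have hg := getD_foldl_rgbBump (toksC s.toList) _ "green" (hd0 _ (by simp))
  have hb := getD_foldl_rgbBump (toksC s.toList) _ "blue" (hd0 _ (by simp))
  have hr := getD_foldl_rgbBump (toksC s.toList) _ "red" (hd0 _ (by simp))
  have eg : (((PySem.Dict.empty.insert "green" (0:Int)).insert "blue" 0).insert "red" 0).getD "green" 0 = 0 := rfl
  have eb : (((PySem.Dict.empty.insert "green" (0:Int)).insert "blue" 0).insert "red" 0).getD "blue" 0 = 0 := rfl
  have er : (((PySem.Dict.empty.insert "green" (0:Int)).insert "blue" 0).insert "red" 0).getD "red" 0 = 0 := rfl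
  simp only [hsplit, rgb_loop_eq, tallyLoop_eq_foldl', hg, hb, hr, eg, eb, er,
    PySem.List.count_eq, zero_add]
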